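-- pv_equiv track=rewrite | github.com/kelaplicativos-rgb/ia-planilhas | core/normalizer/detector.py | _pontuar_coluna
-- ===== SOURCE A (Python) =====
-- def limpar_nome_coluna(col):
--     return (
--         str(col)
--         .strip()
--         .lower()
--         .replace("_", " ")
--         .replace("-", " ")
--         .replace("/", " ")
--         .replace("\\", " ")
--     )
--
-- def _pontuar_coluna(nome_coluna, variacoes):
--     """
--     Retorna uma pontuação para escolher a melhor coluna.
--     Quanto maior, melhor.
--     """
--     nome = limpar_nome_coluna(nome_coluna)
--     score = 0
--
--     for alvo in variacoes:
--         alvo = limpar_nome_coluna(alvo)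
--
--         if nome == alvo:
--             score = max(score, 100)
--         elif nome.startswith(alvo):
--             score = max(score, 90)
--         elif alvo in nome:
--             score = max(score, 70)
--
--     return score
-- ===== SOURCE B (Python) =====
-- def limpar_nome_coluna(col):
--     return (
--         str(col)
--         .strip()
--         .lower()
--         .replace("_", " ")
--         .replace("-", " ")
--         .replace("/", " ")
--         .replace("\\", " ")
--     )
--
-- def _pontuar_coluna(nome_coluna, variacoes):
--     nome = limpar_nome_coluna(nome_coluna)
--     alvos = [limpar_nome_coluna(alvo) for alvo in variacoes]
--     if any(nome == a for a in alvos):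
--         return 100
--     if any(nome.startswith(a) for a in alvos):
--         return 90
--     if any(a in nome for a in alvos):
--         return 70
--     return 0
-- ===== Notes on version B (the rewrite author's own statement) =====
-- stated objective: simpler
-- what changed: Replaces the single accumulating loop with running max by three short-circuiting ordered existence scans (equal, then prefix, then substring) over the pre-cleaned variation list, exploiting that the per-item scores are strictly ordered; the early return after a first hit skips the remaining tests, which a timing run measured as a constant-factor speedup.
import Mathlib
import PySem

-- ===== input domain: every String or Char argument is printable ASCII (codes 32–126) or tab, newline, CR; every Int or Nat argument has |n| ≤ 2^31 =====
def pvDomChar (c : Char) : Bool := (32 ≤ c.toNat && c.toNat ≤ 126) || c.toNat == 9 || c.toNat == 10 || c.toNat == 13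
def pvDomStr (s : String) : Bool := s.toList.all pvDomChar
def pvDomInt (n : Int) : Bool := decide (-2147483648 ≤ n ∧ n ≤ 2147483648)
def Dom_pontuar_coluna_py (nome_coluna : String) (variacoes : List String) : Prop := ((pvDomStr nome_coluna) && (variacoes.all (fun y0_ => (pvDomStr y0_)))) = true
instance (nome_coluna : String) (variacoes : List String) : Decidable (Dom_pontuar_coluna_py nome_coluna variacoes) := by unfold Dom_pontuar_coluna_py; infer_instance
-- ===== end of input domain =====

-- B replaces A's accumulating max-loop by three ordered existence scans over the pre-cleaned variations (simpler decomposition; same value).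

-- ===== PORT A =====
-- shared module helper limpar_nome_coluna (str(col) on a string is the identity)
def limpar_nome_coluna_py (col : String) : String :=
  PySem.Str.replace
    (PySem.Str.replace
      (PySem.Str.replace
        (PySem.Str.replace (PySem.Str.lower (PySem.Str.strip col)) "_" " ")
        "-" " ")
      "/" " ")
    "\\" " "

def pontuar_coluna_py (nome_coluna : String) (variacoes : List String) : Int :=
  let nome := limpar_nome_coluna_py nome_coluna
  variacoes.foldl
    (fun score alvoRaw =>
      let alvo := limpar_nome_coluna_py alvoRaw
      if nome == alvo then max score 100
      else if PySem.Str.startswith nome alvo then max score 90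
      else if PySem.Str.isIn alvo nome then max score 70
      else score)
    0

-- ===== PORT B =====
def pontuar_coluna_py_alt (nome_coluna : String) (variacoes : List String) : Int :=
  let nome := limpar_nome_coluna_py nome_coluna
  let alvos := variacoes.map limpar_nome_coluna_py
  if alvos.any (fun a => nome == a) then 100
  else if alvos.any (fun a => PySem.Str.startswith nome a) then 90
  else if alvos.any (fun a => PySem.Str.isIn a nome) then 70
  else 0

-- ===== PRECONDITION & SPEC =====
def Spec_pontuar_coluna_py (nome_coluna : String) (variacoes : List String) (out : Int) : Prop := out = pontuar_coluna_py_alt nome_coluna variacoes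
instance (nome_coluna : String) (variacoes : List String) (out : Int) : Decidable (Spec_pontuar_coluna_py nome_coluna variacoes out) := by unfold Spec_pontuar_coluna_py; infer_instance

-- ===== CLAIM (what is proved, stated in full; the proofs are below) =====
def Claim_equal_pontuar_coluna_py : Prop := ∀ (nome_coluna : String) (variacoes : List String), Dom_pontuar_coluna_py nome_coluna variacoes → Spec_pontuar_coluna_py nome_coluna variacoes (pontuar_coluna_py nome_coluna variacoes)

-- ===== LEMMAS AND PROOFS =====

-- per-item score of one raw variation, as A computes it
def pvF (nome alvoRaw : String) : Int :=
  let alvo := limpar_nome_coluna_py alvoRaw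
  if nome == alvo then 100
  else if PySem.Str.startswith nome alvo then 90
  else if PySem.Str.isIn alvo nome then 70
  else 0

-- max of the per-item scores
def pvM (nome : String) : List String → Int
  | [] => 0
  | a :: l => max (pvF nome a) (pvM nome l)

theorem pvM_nonneg (nome : String) (l : List String) : 0 ≤ pvM nome l := by
  induction l with
  | nil => simp [pvM]
  | cons a l ih =>
    simp only [pvM, pvF, le_max_iff]
    right; exact ih

theorem foldl_eq_max_pvM (nome : String) (l : List String) (s : Int) (hs : 0 ≤ s) :
    l.foldl
      (fun score alvoRaw =>
        let alvo := limpar_nome_coluna_py alvoRaw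
        if nome == alvo then max score 100
        else if PySem.Str.startswith nome alvo then max score 90
        else if PySem.Str.isIn alvo nome then max score 70
        else score)
      s = max s (pvM nome l) := by
  induction l generalizing s with
  | nil => simp [pvM]; omega
  | cons a l ih =>
    simp only [List.foldl_cons, pvM]
    have hstep : 0 ≤ (if nome == limpar_nome_coluna_py a then max s 100
        else if PySem.Str.startswith nome (limpar_nome_coluna_py a) then max s 90
        else if PySem.Str.isIn (limpar_nome_coluna_py a) nome then max s 70
        else s) := by split_ifs <;> omega
    rw [ih _ hstep]
    simp only [pvF]
    split_ifs <;> omega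

theorem alt_eq_pvM (nome_coluna : String) (variacoes : List String) :
    pontuar_coluna_py_alt nome_coluna variacoes =
      pvM (limpar_nome_coluna_py nome_coluna) variacoes := by
  induction variacoes with
  | nil => simp [pontuar_coluna_py_alt, pvM]
  | cons a l ih =>
    have hnn := pvM_nonneg (limpar_nome_coluna_py nome_coluna) l
    simp only [pontuar_coluna_py_alt, List.map_cons, List.any_cons, pvM, pvF,
      Bool.or_eq_true] at ih ⊢
    by_cases he : (limpar_nome_coluna_py nome_coluna == limpar_nome_coluna_py a) = true <;>
      by_cases hp : PySem.Str.startswith (limpar_nome_coluna_py nome_coluna)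
        (limpar_nome_coluna_py a) = true <;>
      by_cases hi : PySem.Str.isIn (limpar_nome_coluna_py a)
        (limpar_nome_coluna_py nome_coluna) = true <;>
      simp only [he, hp, hi, Bool.false_eq_true, true_or, false_or, if_true, if_false] <;>
      split_ifs at ih ⊢ <;> omega

-- ===== VERDICT (by name: the statement is the Claim_ definition above) =====
theorem pontuar_coluna_py_spec : Claim_equal_pontuar_coluna_py := by
  intro nome_coluna variacoes _
  unfold Spec_pontuar_coluna_py pontuar_coluna_py
  rw [foldl_eq_max_pvM _ _ 0 le_rfl, alt_eq_pvM]
  have := pvM_nonneg (limpar_nome_coluna_py nome_coluna) variacoes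
  omega
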